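-- pv_equiv track=rewrite | github.com/Arsen1302/Code-copy-detector | TestData/solutions/problem_778_5_1.py | solution_778_5_2
-- ===== SOURCE A (Python) =====
-- def solution_778_5_2(s: str) -> str:
-- 	if len(s)<=1: return s
-- 	i,res=1,set()
-- 	while i<len(s)+1:
-- 		for j in range(len(s)):
-- 			if len(s[j:])<i:
-- 				break
-- 			res.add(s[j:j+i])
-- 		i+=1
-- 	res = sorted(res)
-- 	return res[-1]
-- ===== SOURCE B (Python) =====
-- def solution_778_5_2(s: str) -> str:
-- 	# lexicographically greatest substring = greatest suffix: one linear scan over suffixes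
-- 	if len(s) <= 1:
-- 		return s
-- 	best = s
-- 	for i in range(1, len(s)):
-- 		suf = s[i:]
-- 		if suf > best:
-- 			best = suf
-- 	return best
-- ===== Notes on version B (the rewrite author's own statement) =====
-- stated objective: faster
-- what changed: Replaces enumerating every substring into a set and sorting it with a single scan that keeps the maximum suffix, using the fact that the greatest substring is always a suffix.
import Mathlib
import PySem

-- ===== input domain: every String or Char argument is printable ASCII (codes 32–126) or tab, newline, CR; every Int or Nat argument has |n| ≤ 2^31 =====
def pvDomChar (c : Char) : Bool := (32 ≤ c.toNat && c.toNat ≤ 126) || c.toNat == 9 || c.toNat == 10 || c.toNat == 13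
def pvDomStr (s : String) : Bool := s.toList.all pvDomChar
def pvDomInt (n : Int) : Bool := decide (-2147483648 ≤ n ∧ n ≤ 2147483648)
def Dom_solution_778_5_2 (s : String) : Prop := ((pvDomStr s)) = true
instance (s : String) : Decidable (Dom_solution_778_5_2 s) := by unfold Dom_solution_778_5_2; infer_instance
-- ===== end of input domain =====

-- ===== PORT A =====
-- header: B replaces A's enumerate-all-substrings-into-a-set-then-sort with a single
-- scan keeping the maximum suffix (the greatest substring is always a suffix).
-- inner 'for j in range(len(s)): if len(s[j:])<i: break; res.add(s[j:j+i])'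
def pvInnerA (s : String) (i : Int) : List Int → PySem.Set String → PySem.Set String
  | [], res => res
  | j :: js, res =>
      if PySem.Str.len (PySem.Str.slice s (some j) none) < i then res
      else pvInnerA s i js (PySem.Set.add res (PySem.Str.slice s (some j) (some (j + i))))

def solution_778_5_2 (s : String) : String :=
  if PySem.Str.len s ≤ 1 then s
  else
    -- 'i, res = 1, set(); while i < len(s)+1: …; i += 1'  =  fold over range(1, len(s)+1)
    let res : PySem.Set String :=
      (PySem.List.pyRange 1 (PySem.Str.len s + 1) 1).foldl
        (fun res i => pvInnerA s i (PySem.List.pyRange 0 (PySem.Str.len s) 1) res)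
        PySem.Set.empty
    let res2 := PySem.List.sorted res (fun x => x) false
    -- res[-1]; res is nonempty whenever len(s) ≥ 2, so the .getD default is unreachable
    (PySem.List.pyGet? res2 (-1)).getD ""

-- ===== PORT B =====
def solution_778_5_2_alt (s : String) : String :=
  if PySem.Str.len s ≤ 1 then s
  else
    (PySem.List.pyRange 1 (PySem.Str.len s) 1).foldl
      (fun best i =>
        let suf := PySem.Str.slice s (some i) none
        if best < suf then suf else best) s

-- ===== PRECONDITION & SPEC =====

def Spec_solution_778_5_2 (s : String) (out : String) : Prop := out = solution_778_5_2_alt s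
instance (s : String) (out : String) : Decidable (Spec_solution_778_5_2 s out) := by unfold Spec_solution_778_5_2; infer_instance

-- ===== CLAIM (what is proved, stated in full; the proofs are below) =====
def Claim_equal_solution_778_5_2 : Prop := ∀ (s : String), Dom_solution_778_5_2 s → Spec_solution_778_5_2 s (solution_778_5_2 s)

-- ===== LEMMAS AND PROOFS =====

-- generic order facts
lemma pvNotLtOfPrefix : ∀ {l t : List Char}, l <+: t → ¬ List.Lex (· < ·) t l
  | [], _, _, h => by cases h
  | a :: l', t, hp, h => by
    rcases hp with ⟨r, rfl⟩
    cases h with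
    | cons h => exact pvNotLtOfPrefix ⟨r, rfl⟩ h
    | rel h => exact lt_irrefl _ h

lemma pvPrefixLe {x y : String} (h : x.toList <+: y.toList) : x ≤ y := by
  rw [String.le_iff_toList_le]
  exact le_of_not_gt (pvNotLtOfPrefix h)

lemma pvIfLtMax (a b : String) : (if a < b then b else a) = max a b := by
  by_cases h : a < b
  · simp [h, max_eq_right h.le]
  · simp [h, max_eq_left (not_lt.mp h)]

lemma pvPairwiseLeGetLast : ∀ (l : List String) (h : l ≠ []),
    l.Pairwise (· ≤ ·) → ∀ x ∈ l, x ≤ l.getLast h := by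
  intro l
  induction l with
  | nil => intro h; simp at h
  | cons a rest ih =>
    intro _ hp x hx
    rcases List.pairwise_cons.mp hp with ⟨ha, hrest⟩
    cases rest with
    | nil => simp at hx; simp [hx, List.getLast]
    | cons b r =>
      rw [List.getLast_cons (by simp)]
      rcases List.mem_cons.mp hx with rfl | hx'
      · exact le_trans (ha _ (List.getLast_mem _)) le_rfl
      · exact ih (by simp) hrest x hx'

lemma pvPyGetNegOne {α : Type} (l : List α) (h : l ≠ []) :
    PySem.List.pyGet? l (-1) = some (l.getLast h) := by
  have hlen : 0 < l.length := List.length_pos_iff.mpr h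
  simp only [PySem.List.pyGet?, PySem.List.pyIdx?]
  rw [if_neg (by omega), if_pos (by omega)]
  rw [List.getLast_eq_getElem]
  simp only [Option.bind]
  rw [List.getElem?_eq_getElem (by omega)]
  norm_num

-- slice facts
lemma pvSufToList (s : String) (j : Int) (hj : 0 ≤ j) :
    (PySem.Str.slice s (some j) none).toList = s.toList.drop j.toNat := by
  rw [PySem.Str.toList_slice, PySem.Chars.slice_eq_listSlice, PySem.List.slice_from _ hj]

lemma pvSufLen (s : String) (j : Int) (hj : 0 ≤ j) :
    PySem.Str.len (PySem.Str.slice s (some j) none)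
      = ((s.toList.length - j.toNat : Nat) : Int) := by
  simp [PySem.Str.len, pvSufToList s j hj]

lemma pvSlicePrefix (s : String) (j b : Int) :
    (PySem.Str.slice s (some j) (some b)).toList
      <+: s.toList.drop (PySem.List.clampIdx s.toList.length j) := by
  rw [PySem.Str.toList_slice, PySem.Chars.slice_eq_listSlice]
  simp only [PySem.List.slice]
  exact List.take_prefix _ _

-- ===== B-side characterisation =====

-- B's loop is a running max over the suffix strings
lemma pvAltEqFoldlMax (s : String) (h : ¬ PySem.Str.len s ≤ 1) :
    solution_778_5_2_alt s
      = ((PySem.List.pyRange 1 (PySem.Str.len s) 1).map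
          (fun i => PySem.Str.slice s (some i) none)).foldl max s := by
  simp only [solution_778_5_2_alt, if_neg h]
  rw [List.foldl_map]
  exact PySem.List.foldl_congr_mem _ _ _ _ (fun acc x _ => pvIfLtMax _ _)

-- B's result is itself a suffix
lemma pvAltIsSuffix (s : String) (h : ¬ PySem.Str.len s ≤ 1) :
    ∃ k : Nat, k < s.toList.length ∧ (solution_778_5_2_alt s).toList = s.toList.drop k := by
  have hlen : PySem.Str.len s = (s.toList.length : Int) := rfl
  have hn : 2 ≤ s.toList.length := by rw [hlen] at h; omega
  rw [pvAltEqFoldlMax s h]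
  rcases PySem.List.foldl_max_mem ((PySem.List.pyRange 1 (PySem.Str.len s) 1).map
      (fun i => PySem.Str.slice s (some i) none)) s with hv | hv
  · exact ⟨0, by omega, by rw [hv]; simp⟩
  · rcases List.mem_map.mp hv with ⟨i, hi, hvi⟩
    rcases PySem.List.mem_pyRange_one.mp hi with ⟨h1, h2⟩
    rw [hlen] at h2
    refine ⟨i.toNat, by omega, ?_⟩
    rw [← hvi, pvSufToList s i (by omega)]

-- B's result dominates every suffix
lemma pvAltIsMax (s : String) (h : ¬ PySem.Str.len s ≤ 1) :
    ∀ (k : Nat), k < s.toList.length →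
      ∀ x : String, x.toList = s.toList.drop k → x ≤ solution_778_5_2_alt s := by
  intro k hk x hx
  have hlen : PySem.Str.len s = (s.toList.length : Int) := rfl
  rw [pvAltEqFoldlMax s h]
  rcases Nat.eq_zero_or_pos k with rfl | hkpos
  · have hxe : x = s := String.toList_inj.mp (by simpa using hx)
    rw [hxe]
    exact (PySem.List.le_foldl_max _ _).1
  · have hxs : x = PySem.Str.slice s (some (k : Int)) none := by
      apply String.toList_inj.mp
      rw [pvSufToList s _ (by omega)]
      simpa using hx
    refine (PySem.List.le_foldl_max _ _).2 x ?_
    rw [hxs]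
    exact List.mem_map.mpr ⟨(k : Int),
      PySem.List.mem_pyRange_one.mpr ⟨by omega, by rw [hlen]; exact_mod_cast hk⟩, rfl⟩

-- every string whose toList is a prefix of some suffix is ≤ B's result
lemma pvPrefixOfSuffixLeAlt (s : String) (h : ¬ PySem.Str.len s ≤ 1)
    (x : String) (c : Nat) (hc : c ≤ s.toList.length)
    (hx : x.toList <+: s.toList.drop c) : x ≤ solution_778_5_2_alt s := by
  have hlen : PySem.Str.len s = (s.toList.length : Int) := rfl
  have hn : 2 ≤ s.toList.length := by rw [hlen] at h; omega
  by_cases hcn : c < s.toList.length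
  · exact le_trans
      (pvPrefixLe (x := x) (y := String.ofList (s.toList.drop c))
        (by rw [String.toList_ofList]; exact hx))
      (pvAltIsMax s h c hcn _ String.toList_ofList)
  · have hc' : c = s.toList.length := by omega
    rw [hc', List.drop_length] at hx
    have hxnil : x.toList = [] := List.prefix_nil.mp hx
    exact le_trans (pvPrefixLe (y := s) (by rw [hxnil]; exact List.nil_prefix))
      (pvAltIsMax s h 0 (by omega) s (by simp))

-- ===== A-side: the inner loop =====

lemma pvInnerAMono (s : String) (i : Int) {x : String} :
    ∀ (js : List Int) (res : PySem.Set String), x ∈ res → x ∈ pvInnerA s i js res := by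
  intro js
  induction js with
  | nil => intro res hx; simpa [pvInnerA] using hx
  | cons j js ih =>
    intro res hx
    simp only [pvInnerA]
    split
    · exact hx
    · exact ih _ ((PySem.Set.mem_add _ _ _).mpr (Or.inl hx))

lemma pvInnerASound (s : String) (i : Int) {x : String} :
    ∀ (js : List Int) (res : PySem.Set String), x ∈ pvInnerA s i js res →
      x ∈ res ∨ ∃ j : Int, x = PySem.Str.slice s (some j) (some (j + i)) := by
  intro js
  induction js with
  | nil => intro res hx; exact Or.inl (by simpa [pvInnerA] using hx)
  | cons j js ih =>
    intro res hx
    simp only [pvInnerA] at hx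
    split at hx
    · exact Or.inl hx
    · rcases ih _ hx with hmem | hslice
      · rcases (PySem.Set.mem_add _ _ _).mp hmem with hmem' | rfl
        · exact Or.inl hmem'
        · exact Or.inr ⟨j, rfl⟩
      · exact Or.inr hslice

lemma pvInnerAComplete (s : String) (i j₀ : Int) :
    ∀ (js : List Int) (res : PySem.Set String), js.Pairwise (· < ·) → j₀ ∈ js →
      (∀ j ∈ js, j ≤ j₀ → ¬ PySem.Str.len (PySem.Str.slice s (some j) none) < i) →
      PySem.Str.slice s (some j₀) (some (j₀ + i)) ∈ pvInnerA s i js res := by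
  intro js
  induction js with
  | nil => intro res _ hmem; simp at hmem
  | cons j js ih =>
    intro res hpw hmem hnb
    rcases List.pairwise_cons.mp hpw with ⟨hlt, hpw'⟩
    rcases List.mem_cons.mp hmem with rfl | hmem'
    · simp only [pvInnerA]
      rw [if_neg (hnb _ (by simp) le_rfl)]
      exact pvInnerAMono s i _ _ ((PySem.Set.mem_add _ _ _).mpr (Or.inr rfl))
    · have hjlt : j < j₀ := hlt _ hmem'
      simp only [pvInnerA]
      rw [if_neg (hnb _ (by simp) hjlt.le)]
      exact ih _ hpw' hmem' (fun j' hj' hle => hnb _ (by simp [hj']) hle)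

-- ===== A-side: the outer loop =====

lemma pvOuterMono (s : String) {x : String} :
    ∀ (lst : List Int) (acc : PySem.Set String), x ∈ acc →
      x ∈ lst.foldl (fun res i => pvInnerA s i (PySem.List.pyRange 0 (PySem.Str.len s) 1) res) acc := by
  intro lst
  induction lst with
  | nil => intro acc hx; simpa using hx
  | cons i lst ih => intro acc hx; exact ih _ (pvInnerAMono s i _ _ hx)

lemma pvOuterSound (s : String) (P : String → Prop)
    (hP : ∀ j i : Int, P (PySem.Str.slice s (some j) (some (j + i)))) :
    ∀ (lst : List Int) (acc : PySem.Set String), (∀ y ∈ acc, P y) →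
      ∀ x ∈ lst.foldl (fun res i => pvInnerA s i (PySem.List.pyRange 0 (PySem.Str.len s) 1) res) acc, P x := by
  intro lst
  induction lst with
  | nil => intro acc hacc x hx; exact hacc x (by simpa using hx)
  | cons i lst ih =>
    intro acc hacc x hx
    refine ih _ ?_ x hx
    intro y hy
    rcases pvInnerASound s i _ _ hy with hmem | ⟨j, rfl⟩
    · exact hacc y hmem
    · exact hP j i

lemma pvOuterComplete (s : String) (tgt : String) (i₀ : Int)
    (h : ∀ acc : PySem.Set String, tgt ∈ pvInnerA s i₀ (PySem.List.pyRange 0 (PySem.Str.len s) 1) acc) :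
    ∀ (lst : List Int) (acc : PySem.Set String), i₀ ∈ lst →
      tgt ∈ lst.foldl (fun res i => pvInnerA s i (PySem.List.pyRange 0 (PySem.Str.len s) 1) res) acc := by
  intro lst
  induction lst with
  | nil => intro acc hmem; simp at hmem
  | cons i lst ih =>
    intro acc hmem
    rcases List.mem_cons.mp hmem with rfl | hmem'
    · exact pvOuterMono s lst _ (h acc)
    · exact ih _ hmem'

-- pyRange 0 n is strictly increasing
lemma pvPyRangePairwise (n : Nat) : (PySem.List.pyRange 0 (n : Int) 1).Pairwise (· < ·) := by
  rw [PySem.List.pyRange_zero_natCast]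
  exact List.pairwise_lt_range.map _ (fun a b hab => by exact_mod_cast hab)

-- ===== assembly =====

lemma pvMainNontrivial (s : String) (h : ¬ PySem.Str.len s ≤ 1) :
    solution_778_5_2 s = solution_778_5_2_alt s := by
  have hlen : PySem.Str.len s = (s.toList.length : Int) := rfl
  have hn : 2 ≤ s.toList.length := by rw [hlen] at h; omega
  set v := solution_778_5_2_alt s with hv
  obtain ⟨k, hk, hvk⟩ := pvAltIsSuffix s h
  -- v is a member of the final set
  have hvmem : v ∈ (PySem.List.pyRange 1 (PySem.Str.len s + 1) 1).foldl
      (fun res i => pvInnerA s i (PySem.List.pyRange 0 (PySem.Str.len s) 1) res)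
      PySem.Set.empty := by
    have htgt : PySem.Str.slice s (some (k : Int))
        (some ((k : Int) + ((s.toList.length - k : Nat) : Int))) = v := by
      apply String.toList_inj.mp
      rw [hvk]
      have hcast : (k : Int) + ((s.toList.length - k : Nat) : Int)
          = ((s.toList.length : Nat) : Int) := by omega
      rw [PySem.Str.toList_slice, PySem.Chars.slice_eq_listSlice, hcast,
        PySem.List.slice_natCast]
      exact List.take_of_length_le (by simp)
    rw [← htgt]
    refine pvOuterComplete s _ ((s.toList.length - k : Nat) : Int) ?_ _ PySem.Set.empty
      (by rw [hlen]; exact PySem.List.mem_pyRange_one.mpr ⟨by omega, by omega⟩)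
    · intro acc
      apply pvInnerAComplete s _ _ _ acc ?_ ?_ ?_
      · rw [hlen]; exact pvPyRangePairwise s.toList.length
      · rw [hlen]
        exact PySem.List.mem_pyRange_one.mpr ⟨by omega, by omega⟩
      · intro j hj hjk
        rw [hlen] at hj
        rcases PySem.List.mem_pyRange_one.mp hj with ⟨hj0, hjn⟩
        rw [pvSufLen s j hj0]
        have h1 : (j.toNat : Int) = j := Int.toNat_of_nonneg hj0
        omega
  -- every member of the final set is ≤ v
  have hub : ∀ x ∈ (PySem.List.pyRange 1 (PySem.Str.len s + 1) 1).foldl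
      (fun res i => pvInnerA s i (PySem.List.pyRange 0 (PySem.Str.len s) 1) res)
      PySem.Set.empty, x ≤ v := by
    apply pvOuterSound s (· ≤ v) ?_ _ _ ?_
    · intro j i
      exact pvPrefixOfSuffixLeAlt s h _ _ (PySem.List.clampIdx_le _ _) (pvSlicePrefix s j (j + i))
    · intro y hy
      simp [PySem.Set.empty] at hy
  -- extract A's result from the sorted list
  simp only [solution_778_5_2, if_neg h]
  have hne : PySem.List.sorted ((PySem.List.pyRange 1 (PySem.Str.len s + 1) 1).foldl
      (fun res i => pvInnerA s i (PySem.List.pyRange 0 (PySem.Str.len s) 1) res)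
      PySem.Set.empty) (fun x => x) false ≠ [] := by
    rw [Ne, PySem.List.sorted_eq_nil_iff]
    exact List.ne_nil_of_mem hvmem
  rw [pvPyGetNegOne _ hne]
  simp only [Option.getD_some]
  apply le_antisymm
  · exact hub _ ((PySem.List.mem_sorted _ _ _ _).mp (List.getLast_mem hne))
  · exact pvPairwiseLeGetLast _ hne
      (by simpa using PySem.List.sorted_pairwise ((PySem.List.pyRange 1 (PySem.Str.len s + 1) 1).foldl
        (fun res i => pvInnerA s i (PySem.List.pyRange 0 (PySem.Str.len s) 1) res)
        PySem.Set.empty) (fun x => x))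
      v ((PySem.List.mem_sorted _ _ _ _).mpr hvmem)

-- ===== VERDICT (by name: the statement is the Claim_ definition above) =====
theorem solution_778_5_2_spec : Claim_equal_solution_778_5_2 := by
  intro s _
  unfold Spec_solution_778_5_2
  by_cases h : PySem.Str.len s ≤ 1
  · simp only [solution_778_5_2, solution_778_5_2_alt, if_pos h]
  · exact pvMainNontrivial s h
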